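-- pv_equiv track=rewrite | github.com/scarpel/ada | engine/Utils/priceFuncs.py | get_first_price_index
-- ===== SOURCE A (Python) =====
-- def get_first_price_index(text):
--     textLength = len(text)
--     index = 0
--     endIndex = 0
--
--     for letter in text:
--         if(letter.isdigit()):
--             endIndex = index+1
--
--             while(endIndex<textLength):
--                 letter = text[endIndex]
--                 if(letter.isdigit() or letter in {".", ","}): endIndex += 1
--                 else: break
--
--             while(text[endIndex-1] in {".", ","}): endIndex -= 1
--
--             return [index, endIndex]
--         else: index += 1
--
--     return None
-- ===== SOURCE B (Python) =====
-- def get_first_price_index(text):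
--     # Single forward scan: remember the first digit position and the position
--     # just past the last digit seen inside the digit/'.'/',' run; no nested
--     # extend loop and no backwards trim pass.
--     start = None
--     end = 0
--     for k, c in enumerate(text):
--         if c.isdigit():
--             if start is None:
--                 start = k
--             end = k + 1
--         elif start is not None and c not in (".", ","):
--             break
--     return None if start is None else [start, end]
-- ===== Notes on version B (the rewrite author's own statement) =====
-- stated objective: simpler
-- what changed: Replaced A's nested scans (for-loop to the first digit, an inner while extending over digits/dots/commas, then a backwards trim loop over trailing dots/commas) by a single forward pass that records the first digit's index and the position just past the last digit seen in the run.
import Mathlib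
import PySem

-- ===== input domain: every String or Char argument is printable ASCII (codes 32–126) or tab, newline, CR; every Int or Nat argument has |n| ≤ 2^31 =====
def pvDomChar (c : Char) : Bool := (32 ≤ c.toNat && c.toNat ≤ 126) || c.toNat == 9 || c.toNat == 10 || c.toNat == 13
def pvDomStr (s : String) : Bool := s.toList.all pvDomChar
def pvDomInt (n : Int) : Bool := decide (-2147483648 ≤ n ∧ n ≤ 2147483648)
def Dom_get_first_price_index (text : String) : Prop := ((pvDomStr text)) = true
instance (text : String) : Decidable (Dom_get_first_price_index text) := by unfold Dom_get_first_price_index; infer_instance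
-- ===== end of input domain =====

-- B replaces A's nested extend-then-trim scans by one forward pass tracking the first digit
-- and the position after the last digit of the run (objective: simpler, same cost).

-- ===== PORT A =====
-- inner while: extend endIndex while text[endIndex] is a digit, '.' or ','
def aExtend (full : List Char) (n : Nat) (e : Nat) : Nat :=
  if _h : e < n then
    match PySem.List.pyGet? full (e : Int) with
    | some c => if PySem.Chars.isdigit c || c == '.' || c == ',' then aExtend full n (e + 1) else e
    | none => e          -- unreachable: e < n = full.length
  else e
termination_by n - e
decreasing_by omega

-- trailing-trim while loop: step back over '.'/','  (in A, e ≥ 1 and full[e-1] reaches a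
-- digit before e hits 0, so the e = 0 guard and the none branch are unreachable)
def aTrim (full : List Char) (e : Nat) : Nat :=
  match PySem.List.pyGet? full ((e : Int) - 1) with
  | some c =>
    if c == '.' || c == ',' then
      if 0 < e then aTrim full (e - 1) else e
    else e
  | none => e
termination_by e
decreasing_by omega

def aLoop (full : List Char) (n : Nat) : List Char → Nat → Option (List Int)
  | [], _ => none
  | c :: rest, index =>
    if PySem.Chars.isdigit c then
      some [(index : Int), ((aTrim full (aExtend full n (index + 1)) : Nat) : Int)]
    else aLoop full n rest (index + 1)

def get_first_price_index (text : String) : Option (List Int) :=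
  aLoop text.toList text.toList.length text.toList 0

-- ===== PORT B =====
-- single pass of Source B: start = first digit index, e = 1 + index of last digit in the run
def bScan : List Char → Nat → Option Nat → Nat → Option Nat × Nat
  | [], _, start, e => (start, e)
  | c :: rest, k, start, e =>
    if PySem.Chars.isdigit c then bScan rest (k + 1) (some (start.getD k)) (k + 1)
    else if start.isSome && !(c == '.' || c == ',') then (start, e)
    else bScan rest (k + 1) start e

def get_first_price_index_alt (text : String) : Option (List Int) :=
  match bScan text.toList 0 none 0 with
  | (none, _) => none
  | (some s, e) => some [(s : Int), (e : Int)]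

-- ===== PRECONDITION & SPEC =====
def Spec_get_first_price_index (text : String) (out : Option (List Int)) : Prop := out = get_first_price_index_alt text
instance (text : String) (out : Option (List Int)) : Decidable (Spec_get_first_price_index text out) := by unfold Spec_get_first_price_index; infer_instance

-- ===== CLAIM (what is proved, stated in full; the proofs are below) =====
def Claim_equal_get_first_price_index : Prop := ∀ (text : String), Dom_get_first_price_index text → Spec_get_first_price_index text (get_first_price_index text)

-- ===== LEMMAS AND PROOFS =====

-- character classes of the run
def cIn (c : Char) : Bool := PySem.Chars.isdigit c || c == '.' || c == ','
def sepB (c : Char) : Bool := c == '.' || c == ','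

-- length of mid after dropping trailing '.'/',' (what A's trim pass leaves)
def trimLen (m : List Char) : Nat := (m.reverse.dropWhile sepB).length

lemma sepB_of_digit (c : Char) (h : PySem.Chars.isdigit c = true) : sepB c = false := by
  by_cases h1 : c = '.'
  · subst h1; exact absurd h (by decide)
  · by_cases h2 : c = ','
    · subst h2; exact absurd h (by decide)
    · simp [sepB, h1, h2]

-- pure form of B's scan once a start has been found
def gRun : List Char → Nat → Nat → Nat
  | [], _, e => e
  | c :: rest, k, e =>
    if PySem.Chars.isdigit c then gRun rest (k + 1) (k + 1)
    else if sepB c then gRun rest (k + 1) e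
    else e

lemma bScan_some (r : List Char) : ∀ (k s e : Nat),
    bScan r k (some s) e = (some s, gRun r k e) := by
  induction r with
  | nil => intro k s e; rfl
  | cons c rest ih =>
    intro k s e
    by_cases hd : PySem.Chars.isdigit c
    · simp [bScan, gRun, hd, ih]
    · by_cases hs : sepB c
      · simp [bScan, gRun, hd, hs, ih]
        simp [sepB] at hs
        rcases hs with h | h <;> simp [h]
      · simp [bScan, gRun, hd, hs]
        simp [sepB] at hs
        simp [hs]

lemma trimLen_cons_digit (c : Char) (m : List Char) (h : PySem.Chars.isdigit c = true) :
    trimLen (c :: m) = trimLen m + 1 := by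
  have hs := sepB_of_digit c h
  simp [trimLen, List.dropWhile_append, hs]
  split_ifs with h1 <;> simp_all [List.length_eq_zero_iff]

lemma trimLen_cons_sep (c : Char) (m : List Char) (h : sepB c = true) :
    trimLen (c :: m) = if trimLen m = 0 then 0 else trimLen m + 1 := by
  simp [trimLen, List.dropWhile_append, h]
  split_ifs with h1 <;> simp_all

lemma trimLen_append_sep (ms : List Char) (c : Char) (h : sepB c = true) :
    trimLen (ms ++ [c]) = trimLen ms := by
  simp [trimLen, h]

lemma trimLen_append_nonsep (ms : List Char) (c : Char) (h : sepB c = false) :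
    trimLen (ms ++ [c]) = ms.length + 1 := by
  simp [trimLen, h]

lemma gRun_eq (r : List Char) : ∀ (k e : Nat),
    gRun r k e = if trimLen (r.takeWhile cIn) = 0 then e else k + trimLen (r.takeWhile cIn) := by
  induction r with
  | nil => intro k e; simp [gRun, trimLen]
  | cons c rest ih =>
    intro k e
    by_cases hd : PySem.Chars.isdigit c
    · have hc : cIn c = true := by simp [cIn, hd]
      rw [List.takeWhile_cons_of_pos hc]
      rw [trimLen_cons_digit c _ hd]
      simp [gRun, hd, ih]
      split_ifs <;> omega
    · by_cases hs : sepB c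
      · have hc : cIn c = true := by simp [cIn, sepB] at *; tauto
        rw [List.takeWhile_cons_of_pos hc]
        rw [trimLen_cons_sep c _ hs]
        simp [gRun, hd, hs, ih]
        split_ifs <;> omega
      · have hc : cIn c = false := by simp [cIn, sepB] at *; tauto
        rw [List.takeWhile_cons_of_neg (by simp [hc])]
        simp [gRun, hd, hs, trimLen]

lemma aExtend_eq (rest : List Char) : ∀ (pre : List Char),
    aExtend (pre ++ rest) (pre ++ rest).length pre.length
      = pre.length + (rest.takeWhile cIn).length := by
  induction rest with
  | nil => intro pre; rw [aExtend]; simp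
  | cons c r ih =>
    intro pre
    rw [aExtend]
    have hlt : pre.length < (pre ++ c :: r).length := by simp
    simp only [dif_pos hlt, PySem.List.pyGet?_append_length]
    by_cases hc : cIn c
    · simp only [cIn] at hc
      rw [if_pos hc]
      have h2 : pre ++ c :: r = (pre ++ [c]) ++ r := by simp
      have h1 : pre.length + 1 = (pre ++ [c]).length := by simp
      rw [h2, h1, ih (pre ++ [c])]
      rw [List.takeWhile_cons_of_pos (by simp [cIn, hc])]
      simp
      omega
    · simp only [cIn] at hc
      rw [if_neg (by simp_all)]
      rw [List.takeWhile_cons_of_neg (by simp [cIn]; simpa using hc)]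
      simp

lemma aTrim_eq (mid : List Char) : ∀ (pre : List Char) (d : Char) (suf : List Char),
    PySem.Chars.isdigit d = true →
    aTrim (pre ++ d :: (mid ++ suf)) (pre.length + 1 + mid.length)
      = pre.length + 1 + trimLen mid := by
  induction mid using List.reverseRecOn with
  | nil =>
    intro pre d suf hd
    rw [aTrim]
    simp only [List.length_nil, List.nil_append, Nat.add_zero]
    have hi : ((pre.length + 1 : Nat) : Int) - 1 = ((pre.length : Nat) : Int) := by push_cast; ring
    rw [hi]
    simp only [PySem.List.pyGet?_natCast]
    have hgd : (pre ++ d :: suf)[pre.length]? = some d := by simp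
    simp only [hgd]
    have := sepB_of_digit d hd
    simp [sepB] at this
    simp [trimLen, this]
  | append_singleton ms c ih =>
    intro pre d suf hd
    rw [aTrim]
    have hi : ((pre.length + 1 + (ms ++ [c]).length : Nat) : Int) - 1
        = (((pre ++ d :: ms).length : Nat) : Int) := by simp; ring_nf
    rw [hi]
    have hre : pre ++ d :: (ms ++ [c] ++ suf) = (pre ++ d :: ms) ++ c :: suf := by simp
    rw [hre]
    simp only [PySem.List.pyGet?_natCast]
    have hg : ((pre ++ d :: ms) ++ c :: suf)[(pre ++ d :: ms).length]? = some c := by simp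
    simp only [hg]
    by_cases hs : sepB c
    · simp only [sepB] at hs
      rw [if_pos hs, if_pos (by omega)]
      have he : pre.length + 1 + (ms ++ [c]).length - 1 = pre.length + 1 + ms.length := by simp
      rw [he]
      have hih := ih pre d (c :: suf) hd
      rw [show (pre ++ d :: ms) ++ c :: suf = pre ++ d :: (ms ++ c :: suf) by simp]
      rw [hih, trimLen_append_sep ms c (by simp [sepB, hs])]
    · simp only [sepB] at hs
      rw [if_neg hs]
      rw [trimLen_append_nonsep ms c (by simp [sepB]; simpa using hs)]
      simp

lemma loop_eq (cs : List Char) : ∀ (pre : List Char),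
    aLoop (pre ++ cs) (pre ++ cs).length cs pre.length
      = (match bScan cs pre.length none 0 with
         | (none, _) => none
         | (some s, e) => some [(s : Int), (e : Int)]) := by
  induction cs with
  | nil => intro pre; rfl
  | cons c rest ih =>
    intro pre
    by_cases hd : PySem.Chars.isdigit c
    · simp only [aLoop, bScan, hd, if_pos, Option.getD_none]
      rw [bScan_some]
      have hext := aExtend_eq rest (pre ++ [c])
      rw [show (pre ++ [c]) ++ rest = pre ++ c :: rest by simp] at hext
      have hx : pre.length + 1 = (pre ++ [c]).length := by simp
      rw [hx, hext]
      have hmid : rest = rest.takeWhile cIn ++ rest.dropWhile cIn :=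
        (List.takeWhile_append_dropWhile).symm
      have htr := aTrim_eq (rest.takeWhile cIn) pre c (rest.dropWhile cIn) hd
      rw [← hmid] at htr
      have hlen : (pre ++ [c]).length + (rest.takeWhile cIn).length
          = pre.length + 1 + (rest.takeWhile cIn).length := by simp
      rw [hlen, htr]
      rw [gRun_eq]
      split_ifs with h0
      · simp [h0]
      · simp
    · simp only [aLoop, bScan]
      rw [if_neg hd, if_neg (by simp [hd]), if_neg (by simp)]
      have := ih (pre ++ [c])
      rw [show (pre ++ [c]) ++ rest = pre ++ c :: rest by simp] at this
      rw [show pre.length + 1 = (pre ++ [c]).length by simp]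
      exact this

-- ===== VERDICT (by name: the statement is the Claim_ definition above) =====
theorem get_first_price_index_spec : Claim_equal_get_first_price_index := by
  intro text _
  unfold Spec_get_first_price_index get_first_price_index get_first_price_index_alt
  simpa using loop_eq text.toList []
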